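-- pv_equiv track=rewrite | github.com/vintzvintz/relay-planner | relay/formatters.py | _split_spans
-- ===== SOURCE A (Python) =====
-- def _split_spans(spans, mark_segs):
--     """Divise les spans aux points de repère (ticks horaires)."""
--     result = []
--     for s, e, typ, label in spans:
--         cuts = sorted(m for m in mark_segs if s < m < e)
--         boundaries = [s] + cuts + [e]
--         for i in range(len(boundaries) - 1):
--             result.append((boundaries[i], boundaries[i + 1], typ, label if i == 0 else ""))
--     return result
-- ===== SOURCE B (Python) =====
-- def _bisect_right(a, x):
--     lo, hi = 0, len(a)
--     while lo < hi:
--         mid = (lo + hi) // 2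
--         if x < a[mid]:
--             hi = mid
--         else:
--             lo = mid + 1
--     return lo
--
--
-- def _bisect_left(a, x):
--     lo, hi = 0, len(a)
--     while lo < hi:
--         mid = (lo + hi) // 2
--         if a[mid] < x:
--             lo = mid + 1
--         else:
--             hi = mid
--     return lo
--
--
-- def _split_spans(spans, mark_segs):
--     """Divise les spans aux points de repère (ticks horaires)."""
--     ms = sorted(mark_segs)
--     result = []
--     for s, e, typ, label in spans:
--         prev, lab = s, label
--         for m in ms[_bisect_right(ms, s):_bisect_left(ms, e)]:
--             result.append((prev, m, typ, lab))
--             prev, lab = m, ""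
--         result.append((prev, e, typ, lab))
--     return result
-- ===== Notes on version B (the rewrite author's own statement) =====
-- stated objective: faster
-- what changed: mark_segs is sorted once up front and each span's in-range cuts are extracted by binary-search slicing of that sorted list, emitting segments incrementally with a running previous-boundary instead of re-filtering, re-sorting and index-looping over a boundaries list per span
import Mathlib
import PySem

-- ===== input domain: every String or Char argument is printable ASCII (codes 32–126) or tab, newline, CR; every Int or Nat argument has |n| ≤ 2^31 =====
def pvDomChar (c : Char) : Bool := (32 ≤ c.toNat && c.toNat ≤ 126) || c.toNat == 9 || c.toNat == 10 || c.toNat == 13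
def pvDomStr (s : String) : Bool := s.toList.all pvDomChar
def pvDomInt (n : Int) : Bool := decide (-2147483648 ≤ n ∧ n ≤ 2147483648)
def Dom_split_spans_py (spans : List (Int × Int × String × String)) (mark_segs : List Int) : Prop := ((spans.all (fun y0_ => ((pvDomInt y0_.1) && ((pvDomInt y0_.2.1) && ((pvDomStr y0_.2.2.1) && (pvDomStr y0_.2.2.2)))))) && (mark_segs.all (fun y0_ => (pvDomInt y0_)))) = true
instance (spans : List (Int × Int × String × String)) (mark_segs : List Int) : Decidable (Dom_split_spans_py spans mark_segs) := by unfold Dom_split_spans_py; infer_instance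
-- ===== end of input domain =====

-- B sorts mark_segs ONCE and slices each span's cuts out of that sorted list by binary search,
-- emitting segments with a running previous boundary; A re-filters, re-sorts and index-loops per span. (objective: faster)

-- ===== PORT A =====
def split_spans_py (spans : List (Int × Int × String × String)) (mark_segs : List Int) : List (Int × Int × String × String) :=
  spans.foldl (fun result x =>
    match x with
    | (s, e, typ, label) =>
      let cuts := PySem.List.sorted (mark_segs.filter (fun m => decide (s < m) && decide (m < e))) (fun x => x) false
      let boundaries := [s] ++ cuts ++ [e]
      (PySem.List.pyRange 0 ((boundaries.length : Int) - 1) 1).foldl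
        (fun result i =>
          result ++ [(PySem.List.pyGetD boundaries i 0, PySem.List.pyGetD boundaries (i + 1) 0, typ,
            if i = 0 then label else "")]) result) []

-- ===== PORT B =====
-- Source B's inner 'for m in ms[r:l]' loop: append one segment per cut, carrying (prev, lab), then the closing segment
def emitSegs (result : List (Int × Int × String × String)) (prev : Int) (lab : String) (e : Int) (typ : String) :
    List Int → List (Int × Int × String × String)
  | [] => result ++ [(prev, e, typ, lab)]
  | m :: rest => emitSegs (result ++ [(prev, m, typ, lab)]) m "" e typ rest

-- Source B's hand-written _bisect_right/_bisect_left are bisect.bisect_right/bisect_left verbatim = PySem.List.bisectRight/bisectLeft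
def split_spans_py_alt (spans : List (Int × Int × String × String)) (mark_segs : List Int) : List (Int × Int × String × String) :=
  let ms := PySem.List.sorted mark_segs (fun x => x) false
  spans.foldl (fun result x =>
    match x with
    | (s, e, typ, label) =>
      emitSegs result s label e typ
        (PySem.List.slice ms (some ((PySem.List.bisectRight ms s : Nat) : Int))
                             (some ((PySem.List.bisectLeft ms e : Nat) : Int)))) []

-- ===== PRECONDITION & SPEC =====
def Spec_split_spans_py (spans : List (Int × Int × String × String)) (mark_segs : List Int) (out : List (Int × Int × String × String)) : Prop := out = split_spans_py_alt spans mark_segs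
instance (spans : List (Int × Int × String × String)) (mark_segs : List Int) (out : List (Int × Int × String × String)) : Decidable (Spec_split_spans_py spans mark_segs out) := by unfold Spec_split_spans_py; infer_instance

-- ===== CLAIM (what is proved, stated in full; the proofs are below) =====
def Claim_equal_split_spans_py : Prop := ∀ (spans : List (Int × Int × String × String)) (mark_segs : List Int), Dom_split_spans_py spans mark_segs → Spec_split_spans_py spans mark_segs (split_spans_py spans mark_segs)

-- ===== LEMMAS AND PROOFS =====

-- the per-span segment list, described structurally (proof-only helper)
def segsList (prev : Int) (lab : String) (e : Int) (typ : String) : List Int → List (Int × Int × String × String)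
  | [] => [(prev, e, typ, lab)]
  | m :: rest => (prev, m, typ, lab) :: segsList m "" e typ rest

theorem emitSegs_eq (cuts : List Int) : ∀ (result : List (Int × Int × String × String)) (prev : Int) (lab : String) (e : Int) (typ : String),
    emitSegs result prev lab e typ cuts = result ++ segsList prev lab e typ cuts := by
  induction cuts with
  | nil => intro result prev lab e typ; simp [emitSegs, segsList]
  | cons m rest ih => intro result prev lab e typ; simp [emitSegs, segsList, ih]

theorem mapRange_eq_segsList (e : Int) (typ : String) : ∀ (cuts : List Int) (prev : Int) (lab : String),
    (List.range (cuts.length + 1)).map (fun k =>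
      ((prev :: (cuts ++ [e])).getD k 0, (prev :: (cuts ++ [e])).getD (k + 1) 0, typ,
        if k = 0 then lab else "")) = segsList prev lab e typ cuts := by
  intro cuts
  induction cuts with
  | nil => intro prev lab; simp [segsList]
  | cons m rest ih =>
      intro prev lab
      simp only [List.length_cons]
      rw [List.range_succ_eq_map]
      simp only [List.map_cons, List.map_map]
      refine congrArg₂ _ (by simp) ?_
      rw [← ih m ""]
      apply List.map_congr_left
      intro k _
      simp [Nat.succ_eq_add_one]

-- A's inner index loop over 'boundaries' is segsList
theorem a_inner_eq (s e : Int) (typ label : String) (cuts : List Int) (result : List (Int × Int × String × String)) :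
    (PySem.List.pyRange 0 ((([s] ++ cuts ++ [e]).length : Int) - 1) 1).foldl
        (fun result i =>
          result ++ [(PySem.List.pyGetD ([s] ++ cuts ++ [e]) i 0, PySem.List.pyGetD ([s] ++ cuts ++ [e]) (i + 1) 0, typ,
            if i = 0 then label else "")]) result
      = result ++ segsList s label e typ cuts := by
  rw [PySem.List.foldl_append_singleton_eq_map]
  congr 1
  have hb : (([s] ++ cuts ++ [e]).length : Int) - 1 = ((cuts.length + 1 : Nat) : Int) := by
    simp only [List.length_append, List.length_cons, List.length_nil]
    push_cast
    ring
  rw [hb, PySem.List.pyRange_one]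
  have : ((cuts.length + 1 : Nat) : Int) - 0 = ((cuts.length + 1 : Nat) : Int) := by ring
  rw [this, Int.toNat_natCast, List.map_map]
  rw [← mapRange_eq_segsList e typ cuts s label]
  apply List.map_congr_left
  intro k _
  have h1 : (0 : Int) + (k : Int) = ((k : Nat) : Int) := by omega
  have h2 : ((k : Nat) : Int) + 1 = (((k + 1 : Nat)) : Int) := by omega
  simp only [Function.comp_apply, h1, h2, PySem.List.pyGetD_natCast]
  simp

-- drop/take at the bisect indices = filter, on a ≤-sorted list
theorem dropTake_eq_filter (s e : Int) : ∀ (ms : List Int), ms.Pairwise (· ≤ ·) → ∀ (r l : Nat),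
    (∀ (j : Nat) (hj : j < ms.length), j < r → ms[j] ≤ s) →
    (∀ (j : Nat) (hj : j < ms.length), r ≤ j → s < ms[j]) →
    (∀ (j : Nat) (hj : j < ms.length), j < l → ms[j] < e) →
    (∀ (j : Nat) (hj : j < ms.length), l ≤ j → e ≤ ms[j]) →
    (ms.drop r).take (l - r) = ms.filter (fun m => decide (s < m) && decide (m < e)) := by
  intro ms
  induction ms with
  | nil => intro _ r l _ _ _ _; simp
  | cons m t ih =>
      intro hpw r l hr1 hr2 hl1 hl2
      have hmt : ∀ x ∈ t, m ≤ x := (List.pairwise_cons.mp hpw).1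
      have hpw' : t.Pairwise (· ≤ ·) := (List.pairwise_cons.mp hpw).2
      cases r with
      | succ r' =>
          have hm : m ≤ s := by
            have := hr1 0 (by simp) (by omega)
            simpa using this
          have hpm : (fun m => decide (s < m) && decide (m < e)) m = false := by
            simp; omega
          cases l with
          | zero =>
              have hem : e ≤ m := by
                have := hl2 0 (by simp) (by omega)
                simpa using this
              have : (m :: t).filter (fun m => decide (s < m) && decide (m < e)) = [] := by
                rw [List.filter_eq_nil_iff]
                intro x hx
                simp only [Bool.and_eq_true, decide_eq_true_eq, not_and]
                intro _
                rcases List.mem_cons.mp hx with h | h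
                · omega
                · have := hmt x h; omega
              simp [this]
          | succ l' =>
              have step : ((m :: t).drop (r' + 1)).take (l' + 1 - (r' + 1)) = (t.drop r').take (l' - r') := by
                rw [List.drop_succ_cons, Nat.succ_sub_succ]
              rw [step, List.filter_cons_of_neg (by simp; omega)]
              apply ih hpw' r' l'
              · intro j hj hjr; have := hr1 (j + 1) (by simpa using Nat.succ_lt_succ hj) (by omega); simpa using this
              · intro j hj hjr; have := hr2 (j + 1) (by simpa using Nat.succ_lt_succ hj) (by omega); simpa using this
              · intro j hj hjl; have := hl1 (j + 1) (by simpa using Nat.succ_lt_succ hj) (by omega); simpa using this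
              · intro j hj hjl; have := hl2 (j + 1) (by simpa using Nat.succ_lt_succ hj) (by omega); simpa using this
      | zero =>
          have hsm : s < m := by
            have := hr2 0 (by simp) (by omega)
            simpa using this
          cases l with
          | zero =>
              have hem : e ≤ m := by
                have := hl2 0 (by simp) (by omega)
                simpa using this
              have : (m :: t).filter (fun m => decide (s < m) && decide (m < e)) = [] := by
                rw [List.filter_eq_nil_iff]
                intro x hx
                simp only [Bool.and_eq_true, decide_eq_true_eq, not_and]
                intro _
                rcases List.mem_cons.mp hx with h | h
                · omega
                · have := hmt x h; omega
              simp [this]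
          | succ l' =>
              have hme : m < e := by
                have := hl1 0 (by simp) (by omega)
                simpa using this
              rw [List.drop_zero, Nat.sub_zero, List.take_succ_cons, List.filter_cons_of_pos (by simp; omega)]
              congr 1
              have := ih hpw' 0 l'
                (by intro j hj hjr; omega)
                (by intro j hj _; have hx := hmt t[j] (by simp); omega)
                (by intro j hj hjl; have := hl1 (j + 1) (by simpa using Nat.succ_lt_succ hj) (by omega); simpa using this)
                (by intro j hj hjl; have := hl2 (j + 1) (by simpa using Nat.succ_lt_succ hj) (by omega); simpa using this)
              simpa using this

-- cuts as A computes them = cuts as B slices them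
theorem cuts_eq (s e : Int) (mark_segs : List Int) :
    PySem.List.slice (PySem.List.sorted mark_segs (fun x => x) false)
        (some ((PySem.List.bisectRight (PySem.List.sorted mark_segs (fun x => x) false) s : Nat) : Int))
        (some ((PySem.List.bisectLeft (PySem.List.sorted mark_segs (fun x => x) false) e : Nat) : Int))
      = PySem.List.sorted (mark_segs.filter (fun m => decide (s < m) && decide (m < e))) (fun x => x) false := by
  set ms := PySem.List.sorted mark_segs (fun x => x) false with hms
  have hpw : ms.Pairwise (· ≤ ·) := PySem.List.sorted_pairwise mark_segs (fun x => x)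
  have hr := PySem.List.bisectRight_spec ms s hpw
  have hl := PySem.List.bisectLeft_spec ms e hpw
  rw [PySem.List.slice_natCast]
  have hfilt : (ms.drop (PySem.List.bisectRight ms s)).take (PySem.List.bisectLeft ms e - PySem.List.bisectRight ms s)
      = ms.filter (fun m => decide (s < m) && decide (m < e)) := by
    apply dropTake_eq_filter s e ms hpw
    · intro j hj hjr; exact hr.2.1 j hj hjr
    · intro j hj hjr; exact hr.2.2 j hj hjr
    · intro j hj hjl; exact hl.2.1 j hj hjl
    · intro j hj hjl; exact hl.2.2 j hj hjl
  rw [hfilt]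
  -- filter of the sorted list = sorted of the filtered list
  apply PySem.List.eq_of_perm_of_pairwise_le_of_injective (fun x => x) (fun a b h => h)
  · exact ((PySem.List.sorted_perm mark_segs (fun x => x) false).filter _).trans
      (PySem.List.sorted_perm (mark_segs.filter _) (fun x => x) false).symm
  · exact (PySem.List.sorted_pairwise mark_segs (fun x => x)).filter _
  · exact PySem.List.sorted_pairwise _ (fun x => x)

-- ===== VERDICT (by name: the statement is the Claim_ definition above) =====
theorem split_spans_py_spec : Claim_equal_split_spans_py := by
  intro spans mark_segs _
  unfold Spec_split_spans_py split_spans_py split_spans_py_alt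
  apply PySem.List.foldl_congr_mem
  intro acc x _
  rcases x with ⟨s, e, typ, label⟩
  simp only
  rw [a_inner_eq s e typ label, emitSegs_eq, cuts_eq]
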